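-- pv_equiv track=rewrite | github.com/OSU-CMS/DisappTrksML | CNN/utils.py | count_events
-- ===== SOURCE A (Python) =====
-- def count_events(file_batches, event_batches, dict):
--   nSaved=0
--   for files, indices in zip(file_batches, event_batches):
--       if(len(files) == 1 and files[0] == -1): continue
--       lastFile = len(files)-1
--       for iFile, file in enumerate(files):
--           if(iFile == 0 and iFile != lastFile):
--               nSaved+=(dict[str(file)]-indices[0])
--
--           elif(iFile == lastFile and iFile != 0):
--               nSaved+=(indices[1]+1)
--
--           elif(iFile == 0 and iFile == lastFile):
--               nSaved+=(indices[1]-indices[0]+1)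
--
--           elif(iFile != 0 and iFile != lastFile):
--               nSaved+=dict[str(file)]
--   return nSaved
-- ===== SOURCE B (Python) =====
-- def count_events(file_batches, event_batches, dict):
--     # Phase 1: tally multiplicities of all non-last files over valid batches,
--     # and accumulate the endpoint term per batch.
--     middle = {}
--     endpoints = 0
--     for files, indices in zip(file_batches, event_batches):
--         if len(files) == 1 and files[0] == -1:
--             continue
--         if not files:
--             continue
--         for f in files[:-1]:
--             middle[f] = middle.get(f, 0) + 1
--         endpoints += indices[1] - indices[0] + 1
--     # Phase 2: one dict lookup per DISTINCT file, weighted by multiplicity.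
--     return endpoints + sum(dict[str(f)] * c for f, c in middle.items())
-- ===== Notes on version B (the rewrite author's own statement) =====
-- stated objective: alternative
-- what changed: Replaced A's four-way positional branching per file with a two-phase aggregation: one pass tallies multiplicities of all non-last files into a counter dict plus an endpoint accumulator, then a second pass looks each DISTINCT file up in dict once, weighted by its multiplicity; Pre_ excludes the inputs where A raises (missing dict key for a non-last file, or fewer than two indices in a valid batch).
import Mathlib
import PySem

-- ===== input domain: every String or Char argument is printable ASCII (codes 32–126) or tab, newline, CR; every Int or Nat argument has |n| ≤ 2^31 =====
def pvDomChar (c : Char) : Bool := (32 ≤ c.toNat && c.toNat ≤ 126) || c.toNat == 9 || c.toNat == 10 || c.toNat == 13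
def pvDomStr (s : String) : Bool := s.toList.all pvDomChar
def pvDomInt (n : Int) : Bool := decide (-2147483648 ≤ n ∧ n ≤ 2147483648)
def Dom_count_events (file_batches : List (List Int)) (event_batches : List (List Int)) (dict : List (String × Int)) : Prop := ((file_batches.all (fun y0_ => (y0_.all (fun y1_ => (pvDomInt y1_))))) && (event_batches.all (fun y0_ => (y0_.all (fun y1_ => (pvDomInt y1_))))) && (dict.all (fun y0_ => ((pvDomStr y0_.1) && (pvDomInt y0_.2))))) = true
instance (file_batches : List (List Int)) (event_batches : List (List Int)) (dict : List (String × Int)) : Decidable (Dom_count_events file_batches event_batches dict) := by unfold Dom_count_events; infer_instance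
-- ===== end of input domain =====

-- B replaces A's four-way positional branching with a two-phase aggregation: a multiplicity
-- counter of non-last files plus an endpoint accumulator, then one weighted lookup per distinct
-- file (alternative decomposition; return value only, no mutation).

-- ===== PORT A =====
-- dict[str(file)] with a missing key raises KeyError, indices[0]/indices[1] out of range raise
-- IndexError: Pre_count_events excludes both; the port uses .getD 0, which is never reached inside Pre_.
def count_events (file_batches : List (List Int)) (event_batches : List (List Int)) (dict : List (String × Int)) : Int :=
  (List.zip file_batches event_batches).foldl
    (fun nSaved fi =>
      if fi.1.length = 1 ∧ (PySem.List.pyGet? fi.1 0).getD 0 = -1 then nSaved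
      else
        (PySem.List.enumerate fi.1 0).foldl
          (fun acc p =>
            if p.1 = 0 ∧ p.1 ≠ ((fi.1.length : Int) - 1) then
              acc + (((PySem.Dict.mk dict).get? (PySem.Int.toStr p.2)).getD 0 - (PySem.List.pyGet? fi.2 0).getD 0)
            else if p.1 = ((fi.1.length : Int) - 1) ∧ p.1 ≠ 0 then
              acc + ((PySem.List.pyGet? fi.2 1).getD 0 + 1)
            else if p.1 = 0 ∧ p.1 = ((fi.1.length : Int) - 1) then
              acc + ((PySem.List.pyGet? fi.2 1).getD 0 - (PySem.List.pyGet? fi.2 0).getD 0 + 1)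
            else if p.1 ≠ 0 ∧ p.1 ≠ ((fi.1.length : Int) - 1) then
              acc + ((PySem.Dict.mk dict).get? (PySem.Int.toStr p.2)).getD 0
            else acc)
          nSaved)
    0

-- ===== PORT B =====
-- Phase 1: middle[f] = middle.get(f, 0) + 1 over files[:-1] (= dropLast) of every valid batch,
-- endpoints += indices[1] - indices[0] + 1; phase 2: sum(dict[str(f)] * c for f, c in middle.items()).
def count_events_alt (file_batches : List (List Int)) (event_batches : List (List Int)) (dict : List (String × Int)) : Int :=
  let st := (List.zip file_batches event_batches).foldl
    (fun (st : PySem.Dict Int Int × Int) fi =>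
      if fi.1.length = 1 ∧ (PySem.List.pyGet? fi.1 0).getD 0 = -1 then st
      else if fi.1 = [] then st
      else
        (fi.1.dropLast.foldl (fun m f => m.insert f (m.getD f 0 + 1)) st.1,
         st.2 + ((PySem.List.pyGet? fi.2 1).getD 0 - (PySem.List.pyGet? fi.2 0).getD 0 + 1)))
    (PySem.Dict.empty, 0)
  st.2 + st.1.items.foldl
    (fun s p => s + ((PySem.Dict.mk dict).get? (PySem.Int.toStr p.1)).getD 0 * p.2) 0

-- ===== PRECONDITION & SPEC =====
-- Pre_ excludes exactly the inputs on which A raises: in a non-skipped, non-empty batch,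
-- indices must have at least two entries (indices[0]/indices[1], IndexError otherwise) and every
-- file except the last must have its str() key in dict (dict[str(file)] KeyError otherwise).
def Pre_count_events (file_batches : List (List Int)) (event_batches : List (List Int)) (dict : List (String × Int)) : Prop :=
  ∀ fi ∈ List.zip file_batches event_batches,
    (fi.1.length = 1 ∧ (PySem.List.pyGet? fi.1 0).getD 0 = -1) ∨ fi.1 = [] ∨
      (2 ≤ fi.2.length ∧ ∀ f ∈ fi.1.dropLast, ((PySem.Dict.mk dict).get? (PySem.Int.toStr f)).isSome)
instance (file_batches : List (List Int)) (event_batches : List (List Int)) (dict : List (String × Int)) : Decidable (Pre_count_events file_batches event_batches dict) := by unfold Pre_count_events; infer_instance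

def pvWitness_count_events : List (List Int) × List (List Int) × (List (String × Int)) :=
  ([[1, 2, 3], [-1], [5]], [[2, 7], [0, 0], [1, 4]], [("1", 10), ("2", 20)])

def Spec_count_events (file_batches : List (List Int)) (event_batches : List (List Int)) (dict : List (String × Int)) (out : Int) : Prop := out = count_events_alt file_batches event_batches dict
instance (file_batches : List (List Int)) (event_batches : List (List Int)) (dict : List (String × Int)) (out : Int) : Decidable (Spec_count_events file_batches event_batches dict out) := by unfold Spec_count_events; infer_instance

-- ===== CLAIM (what is proved, stated in full; the proofs are below) =====
def Claim_equal_count_events : Prop := ∀ (file_batches : List (List Int)) (event_batches : List (List Int)) (dict : List (String × Int)), Dom_count_events file_batches event_batches dict → Pre_count_events file_batches event_batches dict → Spec_count_events file_batches event_batches dict (count_events file_batches event_batches dict)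

-- ===== LEMMAS AND PROOFS =====

-- dict value of a file, as A looks it up
def pvV (dict : List (String × Int)) (f : Int) : Int :=
  ((PySem.Dict.mk dict).get? (PySem.Int.toStr f)).getD 0

-- per-batch contribution of A (closed form)
def pvBval (dict : List (String × Int)) (fi : List Int × List Int) : Int :=
  if fi.1.length = 1 ∧ (PySem.List.pyGet? fi.1 0).getD 0 = -1 then 0
  else if fi.1 = [] then 0
  else (fi.1.dropLast.map (pvV dict)).sum
        + ((PySem.List.pyGet? fi.2 1).getD 0 - (PySem.List.pyGet? fi.2 0).getD 0 + 1)

-- all non-last files of the valid batches, in order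
def pvMids (l : List (List Int × List Int)) : List Int :=
  l.flatMap (fun fi =>
    if fi.1.length = 1 ∧ (PySem.List.pyGet? fi.1 0).getD 0 = -1 then []
    else if fi.1 = [] then [] else fi.1.dropLast)

-- total endpoint contribution of the valid batches
def pvEnds (l : List (List Int × List Int)) : Int :=
  (l.map (fun fi =>
    if fi.1.length = 1 ∧ (PySem.List.pyGet? fi.1 0).getD 0 = -1 then 0
    else if fi.1 = [] then (0 : Int)
    else (PySem.List.pyGet? fi.2 1).getD 0 - (PySem.List.pyGet? fi.2 0).getD 0 + 1)).sum

-- ---------- A side ----------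

-- pull a foldl (+ dict value) accumulator out front
theorem sum_shift (dict : List (String × Int)) (c : Int) (m : List Int) :
    m.foldl (fun s f => s + ((PySem.Dict.mk dict).get? (PySem.Int.toStr f)).getD 0) c
      = c + m.foldl (fun s f => s + ((PySem.Dict.mk dict).get? (PySem.Int.toStr f)).getD 0) 0 := by
  induction m generalizing c with
  | nil => simp
  | cons z w ihm => simp only [List.foldl_cons]; rw [ihm, ihm (0 + _)]; ring

-- A's inner fold over the tail of the enumeration (index start ≥ 1)
theorem inner_tail (dict : List (String × Int)) (i0 i1 : Int)
    (l : List Int) (hl : l ≠ []) :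
    ∀ (start : Nat) (last : Int) (acc : Int), 1 ≤ start →
      last = (start : Int) + l.length - 1 →
      (PySem.List.enumerate l (start : Int)).foldl
        (fun acc p =>
          if p.1 = 0 ∧ p.1 ≠ last then
            acc + (((PySem.Dict.mk dict).get? (PySem.Int.toStr p.2)).getD 0 - i0)
          else if p.1 = last ∧ p.1 ≠ 0 then acc + (i1 + 1)
          else if p.1 = 0 ∧ p.1 = last then acc + (i1 - i0 + 1)
          else if p.1 ≠ 0 ∧ p.1 ≠ last then
            acc + ((PySem.Dict.mk dict).get? (PySem.Int.toStr p.2)).getD 0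
          else acc)
        acc
      = acc + l.dropLast.foldl (fun s f => s + ((PySem.Dict.mk dict).get? (PySem.Int.toStr f)).getD 0) 0
          + (i1 + 1) := by
  induction l with
  | nil => exact absurd rfl hl
  | cons x t ih =>
    intro start last acc hs hlast
    rw [PySem.List.enumerate_cons]
    cases t with
    | nil =>
      have hx : last = (start : Int) := by
        simp only [List.length_cons, List.length_nil] at hlast; push_cast at hlast; omega
      rw [PySem.List.enumerate_nil]
      simp only [List.foldl_cons, List.foldl_nil]
      have hc : (start : Int) = last ∧ (start : Int) ≠ 0 := ⟨hx.symm, by omega⟩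
      rw [if_neg (by omega), if_pos hc]
      have hdl : ([x] : List Int).dropLast = [] := rfl
      rw [hdl, List.foldl_nil]
      ring
    | cons y u =>
      have hne0 : ¬ ((start : Int) = 0) := by omega
      have hnel : ¬ ((start : Int) = last) := by
        simp only [List.length_cons] at hlast; push_cast at hlast; omega
      simp only [List.foldl_cons]
      rw [if_neg (fun h => hne0 h.1), if_neg (fun h => hnel h.1),
          if_neg (fun h => hne0 h.1), if_pos ⟨hne0, hnel⟩]
      have hstep := ih (by simp) (start + 1) last
        (acc + ((PySem.Dict.mk dict).get? (PySem.Int.toStr x)).getD 0)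
        (by omega) (by simp only [List.length_cons] at hlast ⊢; push_cast at hlast ⊢; omega)
      push_cast at hstep
      rw [hstep]
      have hd : (x :: y :: u).dropLast = x :: (y :: u).dropLast := rfl
      rw [hd, List.foldl_cons, sum_shift, sum_shift dict (0 + _)]
      ring

-- A's inner loop over a non-skipped, non-empty batch equals the closed form
theorem batch_eq (dict : List (String × Int)) (files : List Int) (i0 i1 acc : Int)
    (hne : files ≠ []) :
    (PySem.List.enumerate files 0).foldl
      (fun acc p =>
        if p.1 = 0 ∧ p.1 ≠ ((files.length : Int) - 1) then
          acc + (((PySem.Dict.mk dict).get? (PySem.Int.toStr p.2)).getD 0 - i0)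
        else if p.1 = ((files.length : Int) - 1) ∧ p.1 ≠ 0 then
          acc + (i1 + 1)
        else if p.1 = 0 ∧ p.1 = ((files.length : Int) - 1) then
          acc + (i1 - i0 + 1)
        else if p.1 ≠ 0 ∧ p.1 ≠ ((files.length : Int) - 1) then
          acc + ((PySem.Dict.mk dict).get? (PySem.Int.toStr p.2)).getD 0
        else acc)
      acc
    = acc + files.dropLast.foldl (fun s f => s + ((PySem.Dict.mk dict).get? (PySem.Int.toStr f)).getD 0) 0
        - i0 + i1 + 1 := by
  cases files with
  | nil => exact absurd rfl hne
  | cons x t =>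
    rw [PySem.List.enumerate_cons]
    cases t with
    | nil =>
      rw [PySem.List.enumerate_nil]
      simp only [List.foldl_cons, List.foldl_nil]
      simp only [List.length_cons, List.length_nil]
      norm_num
      ring
    | cons y u =>
      have hlen : ¬ ((0 : Int) = ((x :: y :: u).length : Int) - 1) := by
        simp only [List.length_cons]; push_cast; omega
      simp only [List.foldl_cons]
      rw [if_pos ⟨trivial, hlen⟩]
      have e01 : (0 : Int) + 1 = ((1 : Nat) : Int) := by norm_num
      rw [e01]
      rw [inner_tail dict i0 i1 (y :: u) (by simp) 1 (((x :: y :: u).length : Int) - 1)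
        (acc + (((PySem.Dict.mk dict).get? (PySem.Int.toStr x)).getD 0 - i0))
        le_rfl (by simp only [List.length_cons]; push_cast; omega)]
      have hd : (x :: y :: u).dropLast = x :: (y :: u).dropLast := rfl
      rw [hd, List.foldl_cons, sum_shift, sum_shift dict (0 + _)]
      ring

-- A equals the sum of per-batch closed forms
theorem A_eq_sum (file_batches event_batches : List (List Int)) (dict : List (String × Int)) :
    count_events file_batches event_batches dict
      = ((List.zip file_batches event_batches).map (pvBval dict)).sum := by
  unfold count_events
  induction (List.zip file_batches event_batches) using List.reverseRecOn with
  | nil => rfl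
  | append_singleton l fi ih =>
    rw [List.foldl_append, ih, List.foldl_cons, List.foldl_nil,
        List.map_append, List.sum_append, List.map_cons, List.map_nil, List.sum_cons, List.sum_nil]
    unfold pvBval
    by_cases hskip : fi.1.length = 1 ∧ (PySem.List.pyGet? fi.1 0).getD 0 = -1
    · rw [if_pos hskip, if_pos hskip]; ring
    · rw [if_neg hskip, if_neg hskip]
      by_cases hnil : fi.1 = []
      · rw [if_pos hnil, hnil, PySem.List.enumerate_nil, List.foldl_nil]; ring
      · rw [if_neg hnil, batch_eq dict fi.1 _ _ _ hnil,
            PySem.List.foldl_add (g := fun f => ((PySem.Dict.mk dict).get? (PySem.Int.toStr f)).getD 0)]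
        unfold pvV
        ring

-- ---------- B side ----------

-- sum over a list of (f k + g k) splits
theorem sum_map_add (S : List Int) (f g : Int → Int) :
    (S.map (fun k => f k + g k)).sum = (S.map f).sum + (S.map g).sum := by
  induction S with
  | nil => simp
  | cons a t ih => simp only [List.map_cons, List.sum_cons, ih]; ring

-- on a Nodup list containing x, a sum of 'if k = x then c k else 0' is c x
theorem sum_ite_single (S : List Int) (x : Int) (c : Int → Int)
    (hnd : S.Nodup) (hx : x ∈ S) :
    (S.map (fun k => if k = x then c k else 0)).sum = c x := by
  induction S with
  | nil => cases hx
  | cons a t ih =>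
    obtain ⟨ha, hnt⟩ := List.nodup_cons.mp hnd
    simp only [List.map_cons, List.sum_cons]
    by_cases hax : a = x
    · subst hax
      rw [if_pos rfl]
      have hz : ∀ k ∈ t, (if k = a then c k else 0) = (fun (_ : Int) => (0 : Int)) k := by
        intro k hk
        apply if_neg
        intro hka
        subst hka
        exact ha hk
      rw [List.map_congr_left hz]
      simp
    · rcases List.mem_cons.mp hx with h | h
      · exact absurd h.symm hax
      · rw [if_neg hax, ih hnt h]; ring

-- weighted sum over the distinct elements with multiplicities = plain sum over the list
theorem counter_weighted_sum (v : Int → Int) (L : List Int) :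
    ((PySem.Set.ofList L).map (fun k => v k * (L.count k : Int))).sum = (L.map v).sum := by
  induction L using List.reverseRecOn with
  | nil => rfl
  | append_singleton L x ih =>
    rw [PySem.Set.ofList_append_singleton, List.map_append, List.sum_append,
        List.map_cons, List.map_nil, List.sum_cons, List.sum_nil]
    have hcnt : ∀ k, ((L ++ [x]).count k : Int) = (L.count k : Int) + (if k = x then 1 else 0) := by
      intro k
      rw [List.count_append]
      by_cases hk : k = x
      · subst hk; simp
      · simp [hk, Ne.symm hk]
    by_cases hx : x ∈ L
    · rw [PySem.Set.add_of_mem ((PySem.Set.mem_ofList L x).mpr hx)]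
      have : ((PySem.Set.ofList L).map (fun k => v k * ((L ++ [x]).count k : Int))).sum
          = ((PySem.Set.ofList L).map (fun k => v k * (L.count k : Int)
              + (if k = x then v k else 0))).sum := by
        apply congrArg
        apply List.map_congr_left
        intro k _
        rw [hcnt k]
        by_cases hk : k = x
        · rw [if_pos hk, if_pos hk]; ring
        · rw [if_neg hk, if_neg hk]; ring
      rw [this, sum_map_add, ih,
          sum_ite_single (PySem.Set.ofList L) x v (PySem.Set.nodup_ofList L)
            ((PySem.Set.mem_ofList L x).mpr hx)]
      ring
    · rw [PySem.Set.add_of_not_mem (fun h => hx ((PySem.Set.mem_ofList L x).mp h))]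
      rw [List.map_append, List.sum_append, List.map_cons, List.map_nil, List.sum_cons, List.sum_nil]
      have h1 : ((PySem.Set.ofList L).map (fun k => v k * ((L ++ [x]).count k : Int))).sum
          = ((PySem.Set.ofList L).map (fun k => v k * (L.count k : Int))).sum := by
        apply congrArg
        apply List.map_congr_left
        intro k hk
        rw [hcnt k, if_neg (by
          intro hkx; subst hkx
          exact hx ((PySem.Set.mem_ofList L k).mp hk))]
        ring
      have h2 : v x * ((L ++ [x]).count x : Int) = v x := by
        rw [hcnt x, if_pos rfl, List.count_eq_zero_of_not_mem hx]
        ring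
      rw [h1, h2, ih]

-- pvMids / pvEnds split over a right append
theorem mids_append (l : List (List Int × List Int)) (fi : List Int × List Int) :
    pvMids (l ++ [fi]) = pvMids l
      ++ (if fi.1.length = 1 ∧ (PySem.List.pyGet? fi.1 0).getD 0 = -1 then []
          else if fi.1 = [] then [] else fi.1.dropLast) := by
  unfold pvMids
  rw [List.flatMap_append]
  simp

theorem ends_append (l : List (List Int × List Int)) (fi : List Int × List Int) :
    pvEnds (l ++ [fi]) = pvEnds l
      + (if fi.1.length = 1 ∧ (PySem.List.pyGet? fi.1 0).getD 0 = -1 then 0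
          else if fi.1 = [] then (0 : Int)
          else (PySem.List.pyGet? fi.2 1).getD 0 - (PySem.List.pyGet? fi.2 0).getD 0 + 1) := by
  unfold pvEnds
  rw [List.map_append, List.sum_append]
  simp

-- B's loop state = (counter of all non-last files so far, endpoint total so far)
theorem B_state (l : List (List Int × List Int)) :
    l.foldl
      (fun (st : PySem.Dict Int Int × Int) fi =>
        if fi.1.length = 1 ∧ (PySem.List.pyGet? fi.1 0).getD 0 = -1 then st
        else if fi.1 = [] then st
        else
          (fi.1.dropLast.foldl (fun m f => m.insert f (m.getD f 0 + 1)) st.1,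
           st.2 + ((PySem.List.pyGet? fi.2 1).getD 0 - (PySem.List.pyGet? fi.2 0).getD 0 + 1)))
      (PySem.Dict.empty, 0)
    = (PySem.Dict.counter (pvMids l), pvEnds l) := by
  induction l using List.reverseRecOn with
  | nil => rfl
  | append_singleton l fi ih =>
    rw [List.foldl_append, ih, List.foldl_cons, List.foldl_nil, mids_append, ends_append]
    by_cases hskip : fi.1.length = 1 ∧ (PySem.List.pyGet? fi.1 0).getD 0 = -1
    · rw [if_pos hskip, if_pos hskip, if_pos hskip]
      simp
    · rw [if_neg hskip, if_neg hskip, if_neg hskip]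
      by_cases hnil : fi.1 = []
      · rw [if_pos hnil, if_pos hnil, if_pos hnil]
        simp
      · rw [if_neg hnil, if_neg hnil, if_neg hnil]
        have : PySem.Dict.counter (pvMids l ++ fi.1.dropLast)
            = fi.1.dropLast.foldl (fun m f => m.insert f (m.getD f 0 + 1))
                (PySem.Dict.counter (pvMids l)) := by
          rw [← PySem.Dict.foldl_insert_getD_add_one_eq_counter,
              ← PySem.Dict.foldl_insert_getD_add_one_eq_counter,
              List.foldl_append]
        rw [this]

-- the per-batch closed forms sum to mids-sum + ends
theorem sum_bval (dict : List (String × Int)) (l : List (List Int × List Int)) :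
    (l.map (pvBval dict)).sum = ((pvMids l).map (pvV dict)).sum + pvEnds l := by
  induction l using List.reverseRecOn with
  | nil => rfl
  | append_singleton l fi ih =>
    rw [List.map_append, List.sum_append, List.map_cons, List.map_nil, List.sum_cons,
        List.sum_nil, ih, mids_append, ends_append, List.map_append, List.sum_append]
    unfold pvBval
    by_cases hskip : fi.1.length = 1 ∧ (PySem.List.pyGet? fi.1 0).getD 0 = -1
    · rw [if_pos hskip, if_pos hskip, if_pos hskip]; simp
    · rw [if_neg hskip, if_neg hskip, if_neg hskip]
      by_cases hnil : fi.1 = []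
      · rw [if_pos hnil, if_pos hnil, if_pos hnil]; simp
      · rw [if_neg hnil, if_neg hnil, if_neg hnil]; ring

theorem count_equal (file_batches event_batches : List (List Int)) (dict : List (String × Int)) :
    count_events file_batches event_batches dict = count_events_alt file_batches event_batches dict := by
  rw [A_eq_sum, sum_bval]
  unfold count_events_alt
  simp only [B_state]
  rw [PySem.List.foldl_add
    (g := fun p : Int × Int => ((PySem.Dict.mk dict).get? (PySem.Int.toStr p.1)).getD 0 * p.2)]
  rw [PySem.Dict.items_counter, List.map_map]
  have : ((PySem.Set.ofList (pvMids (List.zip file_batches event_batches))).map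
      ((fun p : Int × Int => ((PySem.Dict.mk dict).get? (PySem.Int.toStr p.1)).getD 0 * p.2)
        ∘ fun k => (k, ((pvMids (List.zip file_batches event_batches)).count k : Int)))).sum
      = ((pvMids (List.zip file_batches event_batches)).map (pvV dict)).sum := by
    have hmc : ((PySem.Set.ofList (pvMids (List.zip file_batches event_batches))).map
        ((fun p : Int × Int => ((PySem.Dict.mk dict).get? (PySem.Int.toStr p.1)).getD 0 * p.2)
          ∘ fun k => (k, ((pvMids (List.zip file_batches event_batches)).count k : Int))))
        = ((PySem.Set.ofList (pvMids (List.zip file_batches event_batches))).map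
          (fun k => pvV dict k * ((pvMids (List.zip file_batches event_batches)).count k : Int))) := by
      apply List.map_congr_left
      intro k _
      rfl
    rw [hmc, counter_weighted_sum (pvV dict)]
  rw [this]
  ring

-- ===== VERDICT (by name: the statement is the Claim_ definition above) =====
theorem count_events_spec : Claim_equal_count_events := by
  intro fb eb d _ _
  unfold Spec_count_events
  exact count_equal fb eb d
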